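-- pv_equiv track=rewrite | github.com/pypi-data/pypi-mirror-96 | packages/chess-term/chess-term-0.0.9.tar.gz/chess-term-0.0.9/chessterm/ui/common.py | moves_to_text
-- ===== SOURCE A (Python) =====
-- from itertools import cycle, zip_longest
--
-- def moves_to_text(moves):
--     white_moves = [move for white, move
--                    in zip(cycle([True, False]), moves) if white]
--     black_moves = [move for black, move
--                    in zip(cycle([False, True]), moves) if black]
--     return [f'{i+1:3}. {white_move:6} {black_move}' if black_move
--             else f'{i+1:3}. {white_move}'
--             for i, (white_move, black_move)
--             in enumerate(zip_longest(white_moves, black_moves))]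
-- ===== SOURCE B (Python) =====
-- def moves_to_text(moves):
--     lines = []
--     pair = 1
--     i = 0
--     n = len(moves)
--     while i < n:
--         white = moves[i]
--         black = moves[i + 1] if i + 1 < n else None
--         if black:
--             lines.append(f'{pair:3}. {white:6} {black}')
--         else:
--             lines.append(f'{pair:3}. {white}')
--         pair += 1
--         i += 2
--     return lines
-- ===== Notes on version B (the rewrite author's own statement) =====
-- stated objective: simpler
-- what changed: Replaced the cycle/zip/zip_longest pipeline of three comprehensions with one index loop stepping by 2 that reads each white/black pair directly and keeps a running pair number.
import Mathlib
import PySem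

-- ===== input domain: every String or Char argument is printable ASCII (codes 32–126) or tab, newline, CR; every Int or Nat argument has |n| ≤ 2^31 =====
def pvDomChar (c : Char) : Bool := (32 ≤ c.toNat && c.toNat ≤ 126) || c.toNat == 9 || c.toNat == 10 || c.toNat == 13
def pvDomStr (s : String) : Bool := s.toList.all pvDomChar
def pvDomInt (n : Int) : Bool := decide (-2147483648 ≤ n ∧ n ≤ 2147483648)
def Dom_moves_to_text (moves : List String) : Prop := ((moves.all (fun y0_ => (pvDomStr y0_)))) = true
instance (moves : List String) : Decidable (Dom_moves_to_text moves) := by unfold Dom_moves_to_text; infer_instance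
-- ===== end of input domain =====

-- B replaces A's cycle/zip/zip_longest pipeline by one recursion over the moves two at a time (simpler decomposition, same cost).

-- shared formatting helpers (the exact f-string layouts both Pythons emit)
-- f'{num:3}' right-justifies the number's digits to width 3 with spaces (num ≥ 1 here)
def pvPadLeft (cs : List Char) (w : Nat) : List Char := List.replicate (w - cs.length) ' ' ++ cs
-- f'{s:6}' left-justifies a string to width 6 with spaces
def pvPadRight (cs : List Char) (w : Nat) : List Char := cs ++ List.replicate (w - cs.length) ' '
def pvLineWB (num : Int) (w b : String) : String :=
  String.mk (pvPadLeft (PySem.Int.toStr num).toList 3 ++ ['.', ' '] ++ pvPadRight w.toList 6 ++ [' '] ++ b.toList)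
def pvLineW (num : Int) (w : String) : String :=
  String.mk (pvPadLeft (PySem.Int.toStr num).toList 3 ++ ['.', ' '] ++ w.toList)

-- ===== PORT A =====
-- [move for keep, move in zip(cycle([True,False]), moves) if keep] (flag alternates each element)
def pvTakeAlt (flag : Bool) : List String → List String
  | [] => []
  | m :: ms => if flag then m :: pvTakeAlt (!flag) ms else pvTakeAlt (!flag) ms

-- itertools.zip_longest with fillvalue None
def pvZipLongest : List String → List String → List (Option String × Option String)
  | [], [] => []
  | x :: xs, [] => (some x, none) :: pvZipLongest xs []
  | [], y :: ys => (none, some y) :: pvZipLongest [] ys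
  | x :: xs, y :: ys => (some x, some y) :: pvZipLongest xs ys

-- f-string rendering of a possibly-None value (Python prints None as "None")
def pvFmtOpt : Option String → String
  | some s => s
  | none => "None"

-- one element of A's final comprehension: truthiness test `if black_move`
def pvLineA (i : Int) (w b : Option String) : String :=
  if b.getD "" ≠ "" then pvLineWB (i + 1) (pvFmtOpt w) (pvFmtOpt b) else pvLineW (i + 1) (pvFmtOpt w)

-- enumerate + comprehension
def pvEmitA (i : Int) : List (Option String × Option String) → List String
  | [] => []
  | p :: rest => pvLineA i p.1 p.2 :: pvEmitA (i + 1) rest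

def moves_to_text (moves : List String) : List String :=
  pvEmitA 0 (pvZipLongest (pvTakeAlt true moves) (pvTakeAlt false moves))

-- ===== PORT B =====
-- Source B's while loop: index i steps by 2, pair counts lines, lines is the accumulator
def pvLoopB (moves : List String) (pair : Int) (i : Nat) (lines : List String) : List String :=
  if h : i < moves.length then
    let white := moves[i]
    let black : Option String := if h2 : i + 1 < moves.length then some moves[i + 1] else none
    let line := if black.getD "" ≠ "" then pvLineWB pair white (black.getD "") else pvLineW pair white
    pvLoopB moves (pair + 1) (i + 2) (lines ++ [line])
  else lines
termination_by moves.length - i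

def moves_to_text_alt (moves : List String) : List String := pvLoopB moves 1 0 []

-- ===== PRECONDITION & SPEC =====
def Spec_moves_to_text (moves : List String) (out : List String) : Prop := out = moves_to_text_alt moves
instance (moves : List String) (out : List String) : Decidable (Spec_moves_to_text moves out) := by unfold Spec_moves_to_text; infer_instance

-- ===== CLAIM (what is proved, stated in full; the proofs are below) =====
def Claim_equal_moves_to_text : Prop := ∀ (moves : List String), Dom_moves_to_text moves → Spec_moves_to_text moves (moves_to_text moves)

-- ===== LEMMAS AND PROOFS =====

-- structural two-at-a-time view of B's loop, used only in the proofs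
def pvSpecB (pair : Int) : List String → List String
  | [] => []
  | [w] => [pvLineW pair w]
  | w :: b :: rest =>
      (if b ≠ "" then pvLineWB pair w b else pvLineW pair w) :: pvSpecB (pair + 1) rest

-- B's index loop computes the structural recursion over the remaining suffix
lemma pvLoopB_eq (moves : List String) : ∀ (k : Nat) (i : Nat), moves.length - i ≤ k →
    ∀ (pair : Int) (lines : List String),
    pvLoopB moves pair i lines = lines ++ pvSpecB pair (moves.drop i) := by
  intro k
  induction k with
  | zero =>
    intro i hk pair lines
    have hi : ¬ i < moves.length := by omega
    rw [pvLoopB]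
    simp [hi, List.drop_eq_nil_of_le (by omega : moves.length ≤ i), pvSpecB]
  | succ k ih =>
    intro i hk pair lines
    rw [pvLoopB]
    by_cases hi : i < moves.length
    · have hdrop : moves.drop i = moves[i] :: moves.drop (i + 1) := List.drop_eq_getElem_cons hi
      simp only [dif_pos hi]
      rw [ih (i + 2) (by omega) (pair + 1) _]
      by_cases h2 : i + 1 < moves.length
      · have hdrop2 : moves.drop (i + 1) = moves[i + 1] :: moves.drop (i + 2) :=
          List.drop_eq_getElem_cons h2
        simp only [dif_pos h2, hdrop, hdrop2, pvSpecB, Option.getD]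
        by_cases hb : moves[i + 1] = "" <;> simp [hb]
      · have hdrop2 : moves.drop (i + 1) = [] :=
          List.drop_eq_nil_of_le (by omega)
        simp [dif_neg h2, hdrop, hdrop2, pvSpecB, Option.getD,
              List.drop_eq_nil_of_le (by omega : moves.length ≤ i + 2)]
    · simp [hi, List.drop_eq_nil_of_le (by omega : moves.length ≤ i), pvSpecB]

-- the pair-recursion invariant: A's pipeline from any start index equals B's recursion at pair = i+1
lemma pvKey : ∀ (n : Nat) (moves : List String), moves.length ≤ n → ∀ (i : Int),
    pvEmitA i (pvZipLongest (pvTakeAlt true moves) (pvTakeAlt false moves)) = pvSpecB (i + 1) moves := by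
  intro n
  induction n with
  | zero =>
    intro moves h i
    have : moves = [] := List.eq_nil_of_length_eq_zero (Nat.le_zero.mp h)
    subst this
    simp [pvTakeAlt, pvZipLongest, pvEmitA, pvSpecB]
  | succ n ih =>
    intro moves h i
    match moves with
    | [] => simp [pvTakeAlt, pvZipLongest, pvEmitA, pvSpecB]
    | [w] =>
      simp [pvTakeAlt, pvZipLongest, pvEmitA, pvSpecB, pvLineA, pvFmtOpt, Option.getD]
    | w :: b :: rest =>
      have hlen : rest.length ≤ n := by
        simp only [List.length_cons] at h; omega
      have hIH := ih rest hlen (i + 1)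
      by_cases hb : b = ""
      · simp [pvTakeAlt, pvZipLongest, pvEmitA, pvSpecB, pvLineA, pvFmtOpt, Option.getD, hb, hIH]
      · simp [pvTakeAlt, pvZipLongest, pvEmitA, pvSpecB, pvLineA, pvFmtOpt, Option.getD, hb, hIH]

-- ===== VERDICT (by name: the statement is the Claim_ definition above) =====
theorem moves_to_text_spec : Claim_equal_moves_to_text := by
  intro moves _
  unfold Spec_moves_to_text moves_to_text moves_to_text_alt
  rw [pvLoopB_eq moves moves.length 0 (by omega) 1 []]
  have := pvKey moves.length moves (le_refl _) 0
  simpa using this
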